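-- pv_equiv track=rewrite | github.com/jihye1996/Algorithm | programmers/주식가격.py | solution
-- ===== SOURCE A (Python) =====
-- def solution(prices):
--     answer = [0 for i in range(len(prices))]
--     stack = []
--
--     for i, v in enumerate(prices):
--         while stack and stack[-1][1] > v:
--             j = stack.pop()[0]
--             answer[j] = i- j
--         stack.append([i, v])
--
--    # 끝까지 가격이 떨어지지 않은 애들
--     while stack:
--         i = stack.pop()[0]
--         answer[i] = len(prices) - 1 - i
--
--     return answer
-- ===== SOURCE B (Python) =====
-- def solution(prices):
--     n = len(prices)
--     # dist[i] = number of steps from i to the first strictly smaller price, or n - i if none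
--     dist = [0] * n
--     for i in range(n - 1, -1, -1):
--         j = i + 1
--         while j < n and prices[j] >= prices[i]:
--             j += dist[j]
--         dist[i] = j - i
--     return [d if i + d < n else n - 1 - i for i, d in enumerate(dist)]
-- ===== Notes on version B (the rewrite author's own statement) =====
-- stated objective: alternative
-- what changed: Replaced the forward monotonic stack (with in-place answer updates and a drain loop) by a backward dynamic program that jumps via already-computed distances to the next strictly smaller price, with no stack.
import Mathlib
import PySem

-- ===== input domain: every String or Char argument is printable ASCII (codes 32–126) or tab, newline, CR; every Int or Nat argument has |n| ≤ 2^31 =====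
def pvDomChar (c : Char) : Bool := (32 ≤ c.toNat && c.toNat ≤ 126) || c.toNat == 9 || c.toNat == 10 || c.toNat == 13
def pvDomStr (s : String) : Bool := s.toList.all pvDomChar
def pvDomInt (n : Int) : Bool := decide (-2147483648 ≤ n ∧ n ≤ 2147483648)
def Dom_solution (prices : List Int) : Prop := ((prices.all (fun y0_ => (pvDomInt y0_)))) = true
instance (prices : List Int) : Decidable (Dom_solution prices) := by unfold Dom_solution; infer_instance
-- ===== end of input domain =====

-- B replaces A's forward monotonic stack by a backward dynamic program that jumps via
-- already-computed next-smaller distances; return values proved equal on all inputs.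

-- ===== PORT A =====
-- the inner `while stack and stack[-1][1] > v` loop (stack head = Python stack top)
def popLoop (i : Nat) (v : Int) : List (Nat × Int) → List Int → List (Nat × Int) × List Int
  | [], ans => ([], ans)
  | (j, w) :: s, ans =>
    if v < w then popLoop i v s (ans.set j ((i : Int) - (j : Int)))
    else ((j, w) :: s, ans)

-- the `for i, v in enumerate(prices)` loop
def mainLoop : List Int → Nat → List (Nat × Int) → List Int → List (Nat × Int) × List Int
  | [], _, st, ans => (st, ans)
  | v :: rest, i, st, ans =>
    let (st', ans') := popLoop i v st ans
    mainLoop rest (i + 1) ((i, v) :: st') ans'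

-- the trailing `while stack` loop
def finalLoop (n : Nat) : List (Nat × Int) → List Int → List Int
  | [], ans => ans
  | (j, _) :: s, ans => finalLoop n s (ans.set j ((n : Int) - 1 - (j : Int)))

def solution (prices : List Int) : List Int :=
  let n := prices.length
  let r := mainLoop prices 0 [] (List.replicate n 0)
  finalLoop n r.1 r.2

-- ===== PORT B =====
-- the `while j < n and prices[j] >= prices[i]: j += dist[j]` loop, in coordinates relative
-- to position i: `rest` = prices[i+1:], `ds` = dist[i+1:], `j` = j - i (starts at 1).
-- `fuel` only bounds the iteration count to make the same computation total; for the
-- distances actually built by distList it is never exhausted.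
def jump (p : Int) (rest : List Int) (ds : List Nat) : Nat → Nat → Nat
  | 0, j => j
  | fuel + 1, j =>
    if j ≤ rest.length ∧ p ≤ rest.getD (j - 1) 0 then
      jump p rest ds fuel (j + ds.getD (j - 1) 0)
    else j

-- the `for i in range(n-1, -1, -1)` loop: dist for each suffix, built right to left
def distList : List Int → List Nat
  | [] => []
  | p :: rest =>
    let ds := distList rest
    jump p rest ds (rest.length + 1) 1 :: ds

-- the final list comprehension `[d if i + d < n else n - 1 - i for i, d in enumerate(dist)]`
def solution_alt (prices : List Int) : List Int :=
  let n := prices.length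
  ((List.range n).zip (distList prices)).map
    (fun e => if e.1 + e.2 < n then (e.2 : Int) else (n : Int) - 1 - (e.1 : Int))

-- ===== PRECONDITION & SPEC =====
def Spec_solution (prices : List Int) (out : List Int) : Prop := out = solution_alt prices
instance (prices : List Int) (out : List Int) : Decidable (Spec_solution prices out) := by unfold Spec_solution; infer_instance

-- ===== CLAIM (what is proved, stated in full; the proofs are below) =====
def Claim_equal_solution : Prop := ∀ (prices : List Int), Dom_solution prices → Spec_solution prices (solution prices)

-- ===== LEMMAS AND PROOFS =====

/-- proof-only reference value: steps from an index until the first price `< p`,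
capped at `l.length`. Both ports are proved to produce exactly these entries. -/
def countB (p : Int) : List Int → Int
  | [] => 0
  | q :: rest => if q < p then 1 else 1 + countB p rest

/-- price at index `k` (all indices used stay in range). -/
def pr (l : List Int) (k : Nat) : Int := l.getD k 0

/-- `j` is still "alive" after processing the first `i` prices: no strictly smaller price yet. -/
def aliveB (l : List Int) (i j : Nat) : Bool := decide (∀ k < i, j < k → pr l j ≤ pr l k)

def stackAt (l : List Int) (i : Nat) : List (Nat × Int) :=
  (((List.range i).filter (fun j => aliveB l i j)).reverse).map (fun j => (j, pr l j))

def ansF (l : List Int) (i : Nat) (j : Nat) : Int :=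
  if aliveB l i j then 0 else countB (pr l j) (l.drop (j + 1))

def ansAt (l : List Int) (i : Nat) : List Int := (List.range l.length).map (ansF l i)

lemma getD_drop (l : List Int) (i m : Nat) : (l.drop i).getD m 0 = l.getD (i + m) 0 := by
  simp [List.getD_eq_getElem?_getD, List.getElem?_drop]

lemma countB_of_first (p : Int) (l : List Int) (t : Nat) (ht : t < l.length)
    (hdrop : l.getD t 0 < p) (hpre : ∀ m < t, ¬ l.getD m 0 < p) :
    countB p l = (t : Int) + 1 := by
  induction l generalizing t with
  | nil => simp at ht
  | cons q rest ih =>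
    by_cases hq : q < p
    · have ht0 : t = 0 := by
        by_contra h
        exact hpre 0 (Nat.pos_of_ne_zero h) (by simpa using hq)
      simp [countB, hq, ht0]
    · have ht0 : t ≠ 0 := by
        intro h; subst h; simp [List.getD] at hdrop; exact hq hdrop
      obtain ⟨t', rfl⟩ := Nat.exists_eq_succ_of_ne_zero ht0
      have := ih t' (by simpa using ht) (by simpa using hdrop)
        (fun m hm => by simpa using hpre (m + 1) (by omega))
      simp [countB, hq, this]
      ring

lemma countB_of_none (p : Int) (l : List Int) (h : ∀ m < l.length, ¬ l.getD m 0 < p) :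
    countB p l = (l.length : Int) := by
  induction l with
  | nil => simp [countB]
  | cons q rest ih =>
    have hq : ¬ q < p := by simpa using h 0 (by simp)
    have := ih (fun m hm => by simpa using h (m + 1) (by simpa using hm))
    simp [countB, hq, this]
    ring

/-- value written by A for an index popped at step `i` is the brute-force count. -/
lemma countB_popped (l : List Int) (i j : Nat) (hj : j < i) (hi : i < l.length)
    (halive : aliveB l i j = true) (hdrop : pr l i < pr l j) :
    countB (pr l j) (l.drop (j + 1)) = (i : Int) - (j : Int) := by
  have halive' := of_decide_eq_true halive
  have h := countB_of_first (pr l j) (l.drop (j + 1)) (i - (j + 1))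
    (by simp; omega)
    (by rw [getD_drop]; have : j + 1 + (i - (j + 1)) = i := by omega
        rw [this]; exact hdrop)
    (by intro m hm
        rw [getD_drop]
        have hlt : j < j + 1 + m := by omega
        have hub : j + 1 + m < i := by omega
        exact not_lt.2 (halive' (j + 1 + m) hub hlt))
  rw [h]; omega

/-- value written by A's final loop for a never-popped index is the brute-force count. -/
lemma countB_alive (l : List Int) (j : Nat) (hj : j < l.length)
    (halive : aliveB l l.length j = true) :
    countB (pr l j) (l.drop (j + 1)) = (l.length : Int) - 1 - (j : Int) := by
  have halive' := of_decide_eq_true halive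
  have h := countB_of_none (pr l j) (l.drop (j + 1))
    (by intro m hm
        rw [getD_drop]
        simp at hm
        exact not_lt.2 (halive' (j + 1 + m) (by omega) (by omega)))
  rw [h]; simp; omega

lemma popLoop_eq (i : Nat) (v : Int) (st : List (Nat × Int)) (ans : List Int) :
    popLoop i v st ans =
      (st.dropWhile (fun e => decide (v < e.2)),
       (st.takeWhile (fun e => decide (v < e.2))).foldl
         (fun a e => a.set e.1 ((i : Int) - (e.1 : Int))) ans) := by
  induction st generalizing ans with
  | nil => simp [popLoop]
  | cons e s ih =>
    obtain ⟨j, w⟩ := e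
    by_cases h : v < w
    · simp [popLoop, h, List.dropWhile, List.takeWhile, ih]
    · simp [popLoop, h, List.dropWhile, List.takeWhile]

lemma finalLoop_eq (n : Nat) (st : List (Nat × Int)) (ans : List Int) :
    finalLoop n st ans =
      st.foldl (fun a e => a.set e.1 ((n : Int) - 1 - (e.1 : Int))) ans := by
  induction st generalizing ans with
  | nil => simp [finalLoop]
  | cons e s ih => obtain ⟨j, w⟩ := e; simp [finalLoop, ih]

lemma takeWhile_eq_filter {α : Type} (p : α → Bool) :
    ∀ (L : List α), L.Pairwise (fun a b => p b = true → p a = true) →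
    L.takeWhile p = L.filter p ∧ L.dropWhile p = L.filter (fun a => !p a) := by
  intro L hL
  induction L with
  | nil => simp
  | cons a L ih =>
    have hmem : ∀ b ∈ L, p b = true → p a = true := (List.pairwise_cons.1 hL).1
    have ihL := ih (List.pairwise_cons.1 hL).2
    by_cases ha : p a = true
    · simp [List.takeWhile, List.dropWhile, List.filter, ha, ihL.1, ihL.2]
    · constructor
      · have : L.filter p = [] := by
          rw [List.filter_eq_nil_iff]
          intro b hb
          simp only [Bool.not_eq_true]
          cases h : p b
          · rfl
          · exact absurd (hmem b hb h) ha
        simp [List.takeWhile, List.filter, ha, this]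
      · have : L.filter (fun a => !p a) = L := by
          rw [List.filter_eq_self]
          intro b hb
          cases h : p b
          · rfl
          · exact absurd (hmem b hb h) ha
        simp [List.dropWhile, List.filter, ha, this]

lemma set_map_range (n j : Nat) (g : Nat → Int) (v : Int) :
    ((List.range n).map g).set j v =
      (List.range n).map (fun k => if k = j then v else g k) := by
  apply List.ext_getElem
  · simp
  · intro k h1 h2
    simp only [List.getElem_set, List.getElem_map, List.getElem_range]
    simp at h1
    split_ifs with hq hq' hq'
    · rfl
    · omega
    · omega
    · rfl

/-- generic: a fold of `List.set` writes over a `map` of `range`. -/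
lemma foldl_set_map_range (n : Nat) (val : Nat → Int) :
    ∀ (L : List (Nat × Int)) (g : Nat → Int),
    L.foldl (fun a e => a.set e.1 (val e.1)) ((List.range n).map g) =
      (List.range n).map (fun k => if k ∈ L.map Prod.fst then val k else g k) := by
  intro L
  induction L with
  | nil => simp
  | cons e L ih =>
    intro g
    rw [List.foldl_cons, set_map_range, ih]
    apply List.map_congr_left
    intro k hk
    by_cases h1 : k ∈ L.map Prod.fst
    · simp [h1]
    · by_cases h2 : k = e.1 <;> simp [h1, h2]

/-- distance to the first strictly smaller price, `l.length + 1` if none: the value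
`distList` stores for each suffix. -/
def distSpec (p : Int) : List Int → Nat
  | [] => 1
  | q :: rest => if q < p then 1 else 1 + distSpec p rest

lemma distSpec_pos (p : Int) (l : List Int) : 1 ≤ distSpec p l := by
  cases l with
  | nil => simp [distSpec]
  | cons q rest => simp only [distSpec]; split <;> omega

lemma distSpec_le (p : Int) (l : List Int) : distSpec p l ≤ l.length + 1 := by
  induction l with
  | nil => simp [distSpec]
  | cons q rest ih => simp only [distSpec, List.length_cons]; split <;> omega

lemma distSpec_prefix_ge (p : Int) (l : List Int) :
    ∀ k, k < distSpec p l - 1 → p ≤ l.getD k 0 := by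
  induction l with
  | nil => simp [distSpec]
  | cons q rest ih =>
    intro k hk
    simp only [distSpec] at hk
    by_cases hq : q < p
    · simp [hq] at hk
    · cases k with
      | zero => simpa using not_lt.1 hq
      | succ k' =>
        rw [List.getD_cons_succ]
        exact ih k' (by simp [hq] at hk; omega)

lemma distSpec_drop_lt (p : Int) (l : List Int) (h : distSpec p l ≤ l.length) :
    l.getD (distSpec p l - 1) 0 < p := by
  induction l with
  | nil => simp [distSpec] at h
  | cons q rest ih =>
    simp only [distSpec] at h ⊢
    by_cases hq : q < p
    · simp [hq]
    · have h1 : 1 ≤ distSpec p rest := distSpec_pos p rest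
      simp only [hq, if_false] at h ⊢
      rw [show 1 + distSpec p rest - 1 = (distSpec p rest - 1) + 1 by omega,
        List.getD_cons_succ]
      exact ih (by simp at h; omega)

lemma getD_drop' {α : Type} (d : α) (l : List α) (i m : Nat) :
    (l.drop i).getD m d = l.getD (i + m) d := by
  simp [List.getD_eq_getElem?_getD, List.getElem?_drop]

lemma jump_correct (p : Int) (rest : List Int) (ds : List Nat)
    (hds : ds = (List.range rest.length).map (fun k => distSpec (pr rest k) (rest.drop (k + 1)))) :
    ∀ (fuel j : Nat), 1 ≤ j → j ≤ distSpec p rest →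
    (∀ k, k < j - 1 → p ≤ rest.getD k 0) →
    distSpec p rest ≤ j + fuel →
    jump p rest ds fuel j = distSpec p rest := by
  intro fuel
  induction fuel with
  | zero =>
    intro j h1 h2 hinv hfuel
    have : j = distSpec p rest := by omega
    simp [jump, this]
  | succ fuel ih =>
    intro j h1 h2 hinv hfuel
    rw [jump]
    by_cases hc : j ≤ rest.length ∧ p ≤ rest.getD (j - 1) 0
    · rw [if_pos hc]
      have hjlt : j - 1 < rest.length := by omega
      have hdsval : ds.getD (j - 1) 0 = distSpec (pr rest (j - 1)) (rest.drop j) := by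
        rw [hds, List.getD_eq_getElem?_getD, List.getElem?_map]
        rw [List.getElem?_range hjlt]
        simp only [Option.map_some, Option.getD_some]
        rw [show j - 1 + 1 = j from by omega]
      set q := pr rest (j - 1) with hq
      set d := distSpec q (rest.drop j) with hd
      have hd1 : 1 ≤ d := distSpec_pos q (rest.drop j)
      have hdle : d ≤ (rest.drop j).length + 1 := distSpec_le q (rest.drop j)
      have hlen : (rest.drop j).length = rest.length - j := by simp
      -- every index below the new position still carries a price ≥ p
      have hinv' : ∀ k, k < j + d - 1 → p ≤ rest.getD k 0 := by
        intro k hk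
        rcases lt_trichotomy k (j - 1) with h | h | h
        · exact hinv k h
        · rw [h]; exact hc.2
        · have hk2 : k - j < d - 1 := by omega
          have := distSpec_prefix_ge q (rest.drop j) (k - j) hk2
          rw [getD_drop'] at this
          have hqk : q ≤ rest.getD k 0 := by
            rw [show j + (k - j) = k by omega] at this
            exact this
          have hpq : p ≤ q := by
            rw [hq, pr, show rest.getD (j - 1) 0 = rest.getD (j - 1) 0 from rfl] at *
            exact hc.2
          omega
      -- the new position does not overshoot the first drop
      have hlt : j + d ≤ distSpec p rest := by
        by_contra hgt
        rw [not_le] at hgt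
        have hdsle : distSpec p rest ≤ rest.length := by
          have := distSpec_le p rest
          omega
        have hdrop := distSpec_drop_lt p rest hdsle
        have hge := hinv' (distSpec p rest - 1) (by have := distSpec_pos p rest; omega)
        omega
      rw [hdsval]
      exact ih (j + d) (by omega) hlt hinv' (by omega)
    · rw [if_neg hc]
      rw [not_and_or, not_le, not_le] at hc
      by_cases hj : j ≤ rest.length
      · have hlt : rest.getD (j - 1) 0 < p := by
          rcases hc with h | h
          · omega
          · exact h
        -- price at j-1 is < p, so the first drop is at or before j-1: j = distSpec
        by_contra hne
        have hjlt : j < distSpec p rest := by omega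
        have := distSpec_prefix_ge p rest (j - 1) (by omega)
        omega
      · have := distSpec_le p rest
        omega

lemma distList_eq (l : List Int) :
    distList l = (List.range l.length).map (fun k => distSpec (pr l k) (l.drop (k + 1))) := by
  induction l with
  | nil => simp [distList]
  | cons p rest ih =>
    rw [show distList (p :: rest) =
        jump p rest (distList rest) (rest.length + 1) 1 :: distList rest from rfl]
    have hhead : jump p rest (distList rest) (rest.length + 1) 1 = distSpec p rest := by
      apply jump_correct p rest (distList rest) ih
      · exact le_refl 1
      · exact distSpec_pos p rest
      · intro k hk; omega
      · have := distSpec_le p rest; omega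
    rw [hhead, ih]
    simp only [List.length_cons, List.range_succ_eq_map, List.map_cons, List.map_map]
    refine congrArg₂ List.cons ?_ ?_
    · simp [pr]
    · apply List.map_congr_left
      intro j hj
      simp [pr, Function.comp]

lemma countB_eq_min (p : Int) (l : List Int) :
    countB p l = ((min (distSpec p l) l.length : Nat) : Int) := by
  induction l with
  | nil => simp [countB, distSpec]
  | cons q rest ih =>
    by_cases hq : q < p
    · simp [countB, distSpec, hq]
    · simp only [countB, distSpec, hq, if_false, List.length_cons, ih]
      push_cast
      omega

lemma zip_self_map {α β : Type} (f : α → β) :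
    ∀ l : List α, l.zip (l.map f) = l.map (fun a => (a, f a)) := by
  intro l
  induction l with
  | nil => simp
  | cons a l ih => simp [ih]

lemma solution_alt_eq (l : List Int) :
    solution_alt l = (List.range l.length).map (fun j => countB (pr l j) (l.drop (j + 1))) := by
  rw [show solution_alt l = ((List.range l.length).zip (distList l)).map
      (fun e => if e.1 + e.2 < l.length then (e.2 : Int)
                else (l.length : Int) - 1 - (e.1 : Int)) from rfl]
  rw [distList_eq, zip_self_map, List.map_map]
  apply List.map_congr_left
  intro k hk
  have hkn : k < l.length := List.mem_range.1 hk
  have hlen : (l.drop (k + 1)).length = l.length - (k + 1) := by simp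
  have hle := distSpec_le (pr l k) (l.drop (k + 1))
  have hpos := distSpec_pos (pr l k) (l.drop (k + 1))
  simp only [Function.comp_apply, countB_eq_min]
  split_ifs with h
  · push_cast; omega
  · push_cast; omega

lemma aliveB_self (l : List Int) (i : Nat) : aliveB l (i + 1) i = true := by
  simp only [aliveB, decide_eq_true_eq]
  intro k h1 h2; omega

lemma aliveB_ge (l : List Int) (i j : Nat) (h : i ≤ j) : aliveB l i j = true := by
  simp only [aliveB, decide_eq_true_eq]
  intro k h1 h2; omega

lemma aliveB_succ_eq (l : List Int) (i j : Nat) (hj : j < i) :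
    aliveB l (i + 1) j = (aliveB l i j && decide (pr l j ≤ pr l i)) := by
  rw [show (aliveB l i j && decide (pr l j ≤ pr l i)) =
      decide ((∀ k < i, j < k → pr l j ≤ pr l k) ∧ pr l j ≤ pr l i) by simp [aliveB]]
  rw [aliveB, decide_eq_decide]
  constructor
  · intro h
    exact ⟨fun k hk hjk => h k (by omega) hjk, h i (by omega) hj⟩
  · rintro ⟨h1, h2⟩ k hk hjk
    rcases Nat.lt_succ_iff_lt_or_eq.1 hk with h | rfl
    · exact h1 k h hjk
    · exact h2

lemma stackAt_succ (l : List Int) (i : Nat) :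
    stackAt l (i + 1) = (i, pr l i) ::
      (((List.range i).filter (fun j => aliveB l (i + 1) j)).reverse).map
        (fun j => (j, pr l j)) := by
  unfold stackAt
  rw [List.range_succ, List.filter_append]
  simp [aliveB_self]

lemma stackAt_filter (l : List Int) (i : Nat) (q : Int → Bool) :
    (stackAt l i).filter (fun e => q e.2) =
      (((List.range i).filter (fun j => aliveB l i j && q (pr l j))).reverse).map
        (fun j => (j, pr l j)) := by
  unfold stackAt
  rw [List.filter_map, List.filter_reverse, List.filter_filter]
  congr 2
  apply List.filter_congr
  intro j hj
  simp [Function.comp, Bool.and_comm]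

lemma pop_step (l : List Int) (i : Nat) (hi : i < l.length) :
    popLoop i (pr l i) (stackAt l i) (ansAt l i) =
      ((((List.range i).filter (fun j => aliveB l (i + 1) j)).reverse).map
         (fun j => (j, pr l j)),
       ansAt l (i + 1)) := by
  rw [popLoop_eq]
  have hpw : (stackAt l i).Pairwise
      (fun a b => decide (pr l i < b.2) = true → decide (pr l i < a.2) = true) := by
    unfold stackAt
    rw [List.pairwise_map, List.pairwise_reverse]
    have base : ((List.range i).filter (fun j => aliveB l i j)).Pairwise (· < ·) :=
      (List.pairwise_lt_range).filter _
    refine base.imp_of_mem ?_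
    intro a b ha hb hab
    simp only [decide_eq_true_eq]
    intro hv
    have hbi : b < i := List.mem_range.1 (List.mem_filter.1 hb).1
    have halive : aliveB l i a = true := (List.mem_filter.1 ha).2
    have := (of_decide_eq_true halive) b hbi hab
    omega
  obtain ⟨htake, hdrop⟩ := takeWhile_eq_filter _ _ hpw
  rw [htake, hdrop]
  have hstack : (stackAt l i).filter (fun e => !decide (pr l i < e.2)) =
      (((List.range i).filter (fun j => aliveB l (i + 1) j)).reverse).map
        (fun j => (j, pr l j)) := by
    rw [stackAt_filter l i (fun x => !decide (pr l i < x))]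
    congr 1
    congr 1
    apply List.filter_congr
    intro j hj
    rw [aliveB_succ_eq l i j (List.mem_range.1 hj)]
    congr 1
    simp [← decide_not, not_lt]
  have hans : ((stackAt l i).filter (fun e => decide (pr l i < e.2))).foldl
      (fun a e => a.set e.1 ((i : Int) - (e.1 : Int))) (ansAt l i) = ansAt l (i + 1) := by
    rw [stackAt_filter l i (fun x => decide (pr l i < x))]
    rw [show ansAt l i = (List.range l.length).map (ansF l i) from rfl]
    rw [foldl_set_map_range l.length (fun k => (i : Int) - (k : Int))]
    apply List.map_congr_left
    intro k hk
    have hkn : k < l.length := List.mem_range.1 hk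
    simp only [List.map_map, List.map_reverse, List.mem_reverse, List.mem_map]
    have hmem : (∃ a ∈ (List.range i).filter (fun j => aliveB l i j && decide (pr l i < pr l j)),
        (Prod.fst ∘ fun j => (j, pr l j)) a = k) ↔
        k ∈ (List.range i).filter (fun j => aliveB l i j && decide (pr l i < pr l j)) := by
      constructor
      · rintro ⟨a, ha, rfl⟩; exact ha
      · intro h; exact ⟨k, h, rfl⟩
    rw [if_congr hmem rfl rfl]
    by_cases hkG : k ∈ (List.range i).filter (fun j => aliveB l i j && decide (pr l i < pr l j))
    · obtain ⟨hkr, hprop⟩ := List.mem_filter.1 hkG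
      have hki : k < i := List.mem_range.1 hkr
      have halive : aliveB l i k = true := by
        have := hprop; simp only [Bool.and_eq_true] at this; exact this.1
      have hv : pr l i < pr l k := by
        have := hprop; simp only [Bool.and_eq_true, decide_eq_true_eq] at this; exact this.2
      rw [if_pos hkG]
      unfold ansF
      rw [aliveB_succ_eq l i k hki, halive]
      have hle : decide (pr l k ≤ pr l i) = false := by simp; omega
      rw [hle]
      simp only [Bool.true_and, Bool.false_eq_true, if_false]
      exact (countB_popped l i k hki hi halive hv).symm
    · rw [if_neg hkG]
      by_cases hik : i ≤ k
      · unfold ansF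
        rcases Nat.eq_or_lt_of_le hik with heq | hlt
        · rw [aliveB_ge l i k hik, ← heq, aliveB_self l i]
        · rw [aliveB_ge l i k hik, aliveB_ge l (i + 1) k (by omega)]
      · have hki : k < i := by omega
        unfold ansF
        rw [aliveB_succ_eq l i k hki]
        cases halive : aliveB l i k with
        | false => simp
        | true =>
          cases hle : decide (pr l k ≤ pr l i) with
          | true => simp
          | false =>
            exfalso
            apply hkG
            refine List.mem_filter.2 ⟨List.mem_range.2 hki, ?_⟩
            simp only [Bool.and_eq_true, decide_eq_true_eq]
            refine ⟨halive, ?_⟩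
            simp only [decide_eq_false_iff_not, not_le] at hle
            exact hle
  rw [hstack, hans]

lemma mainLoop_inv (l : List Int) :
    ∀ (rest : List Int) (i : Nat), rest = l.drop i → i ≤ l.length →
    mainLoop rest i (stackAt l i) (ansAt l i) = (stackAt l l.length, ansAt l l.length) := by
  intro rest
  induction rest with
  | nil =>
    intro i hdrop hle
    have hlen : l.length - i = 0 := by
      have := congrArg List.length hdrop; simpa using this.symm
    have : i = l.length := by omega
    subst this
    simp [mainLoop]
  | cons v rest' ih =>
    intro i hdrop hle
    have hi : i < l.length := by
      have := congrArg List.length hdrop; simp at this; omega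
    have hcons : l.drop i = l[i] :: l.drop (i + 1) := List.drop_eq_getElem_cons hi
    rw [hcons] at hdrop
    obtain ⟨hv, hrest⟩ := List.cons.injEq .. ▸ hdrop
    have hv' : v = pr l i := by
      rw [hv, pr, List.getD_eq_getElem l 0 hi]
    subst hv'
    rw [show mainLoop (pr l i :: rest') i (stackAt l i) (ansAt l i) =
        (let r := popLoop i (pr l i) (stackAt l i) (ansAt l i)
         mainLoop rest' (i + 1) ((i, pr l i) :: r.1) r.2) from rfl]
    rw [pop_step l i hi]
    show mainLoop rest' (i + 1)
        ((i, pr l i) ::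
          (((List.range i).filter (fun j => aliveB l (i + 1) j)).reverse).map
            (fun j => (j, pr l j)))
        (ansAt l (i + 1)) = (stackAt l l.length, ansAt l l.length)
    rw [show ((i, pr l i) ::
        (((List.range i).filter (fun j => aliveB l (i + 1) j)).reverse).map
          (fun j => (j, pr l j))) = stackAt l (i + 1) from (stackAt_succ l i).symm]
    exact ih (i + 1) hrest (by omega)

theorem solution_spec : Claim_equal_solution := by
  intro prices hdom
  show solution prices = solution_alt prices
  have h0s : stackAt prices 0 = [] := by simp [stackAt]
  have h0a : ansAt prices 0 = List.replicate prices.length 0 := by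
    apply List.ext_getElem
    · simp [ansAt]
    · intro k h1 h2
      simp [ansAt, ansF, aliveB_ge prices 0 k (Nat.zero_le k)]
  have hmain := mainLoop_inv prices prices 0 (by simp) (by simp)
  rw [h0s, h0a] at hmain
  rw [show solution prices = finalLoop prices.length
      (mainLoop prices 0 [] (List.replicate prices.length 0)).1
      (mainLoop prices 0 [] (List.replicate prices.length 0)).2 from rfl]
  rw [hmain]
  rw [finalLoop_eq]
  rw [show ansAt prices prices.length = (List.range prices.length).map (ansF prices prices.length)
      from rfl]
  rw [show (stackAt prices prices.length : List (Nat × Int)) =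
      (((List.range prices.length).filter (fun j => aliveB prices prices.length j)).reverse).map
        (fun j => (j, pr prices j)) from rfl]
  rw [foldl_set_map_range prices.length (fun k => (prices.length : Int) - 1 - (k : Int))]
  rw [solution_alt_eq]
  apply List.map_congr_left
  intro k hk
  have hkn : k < prices.length := List.mem_range.1 hk
  simp only [List.map_map, List.map_reverse, List.mem_reverse, List.mem_map]
  have hmem : (∃ a ∈ (List.range prices.length).filter (fun j => aliveB prices prices.length j),
      (Prod.fst ∘ fun j => (j, pr prices j)) a = k) ↔
      k ∈ (List.range prices.length).filter (fun j => aliveB prices prices.length j) := by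
    constructor
    · rintro ⟨a, ha, rfl⟩; exact ha
    · intro h; exact ⟨k, h, rfl⟩
  rw [if_congr hmem rfl rfl]
  by_cases halive : aliveB prices prices.length k = true
  · rw [if_pos (List.mem_filter.2 ⟨hk, halive⟩)]
    exact (countB_alive prices k hkn halive).symm
  · rw [if_neg (fun h => halive (List.mem_filter.1 h).2)]
    unfold ansF
    rw [if_neg (by simpa using halive)]
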